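-- pv_equiv track=rewrite | github.com/Shinipsae/CosPro | Test/test01.py | solution6
-- ===== SOURCE A (Python) =====
-- def solution6(left_rings): # 쓰이지 않는 변수가 있는지 확인
--     answer = 0
--     for i in range(len(left_rings)):
--         if left_rings[i] <= i: # 주로 index에 반복하는 변수가 들어감
--             for k in range(i): # k의 반복문이기 때문에 문장에 k가 들어가야함
--                 if left_rings[k] > left_rings[i]:
--                     answer += 1
--     return answer
-- ===== SOURCE B (Python) =====
-- def _bisect_right(s, x):
--     lo, hi = 0, len(s)
--     while lo < hi:
--         mid = (lo + hi) // 2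
--         if x < s[mid]:
--             hi = mid
--         else:
--             lo = mid + 1
--     return lo
--
-- def solution6(left_rings):
--     answer = 0
--     s = []  # sorted prefix of the values seen so far
--     for i, x in enumerate(left_rings):
--         pos = _bisect_right(s, x)
--         if x <= i:
--             answer += len(s) - pos
--         s.insert(pos, x)
--     return answer
-- ===== Notes on version B (the rewrite author's own statement) =====
-- stated objective: faster
-- what changed: Instead of rescanning the whole prefix for each qualifying index (nested loops), B maintains the prefix as a sorted list and gets the count of strictly greater earlier elements as len(s) - bisect_right(s, x) via hand-written binary search, inserting each value at its sorted position.
import Mathlib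
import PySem

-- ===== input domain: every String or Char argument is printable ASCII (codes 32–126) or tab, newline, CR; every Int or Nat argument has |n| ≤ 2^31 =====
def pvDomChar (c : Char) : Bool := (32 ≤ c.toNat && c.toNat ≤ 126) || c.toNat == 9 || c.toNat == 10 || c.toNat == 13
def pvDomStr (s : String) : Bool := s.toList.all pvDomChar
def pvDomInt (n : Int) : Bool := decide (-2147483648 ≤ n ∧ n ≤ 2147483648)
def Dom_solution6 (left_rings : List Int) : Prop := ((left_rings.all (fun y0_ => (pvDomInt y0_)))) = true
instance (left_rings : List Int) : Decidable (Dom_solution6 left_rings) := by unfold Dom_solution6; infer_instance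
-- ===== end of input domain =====

-- B replaces A's per-index rescan of the whole prefix by a sorted prefix list with a
-- hand-written binary search (bisect_right): count of greater earlier elements = len(s) - pos.

-- ===== PORT A =====
def solution6 (left_rings : List Int) : Int :=
  (PySem.List.pyRange 0 left_rings.length 1).foldl (fun answer i =>
    if PySem.List.pyGetD left_rings i 0 ≤ i then
      (PySem.List.pyRange 0 i 1).foldl (fun answer k =>
        if PySem.List.pyGetD left_rings i 0 < PySem.List.pyGetD left_rings k 0 then answer + 1
        else answer) answer
    else answer) 0

-- ===== PORT B =====
-- the while-loop of _bisect_right in Source B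
def bisectLoop (s : List Int) (x : Int) (lo hi : Int) : Int :=
  if h : lo < hi then
    let mid := PySem.Int.floordiv (lo + hi) 2
    if x < PySem.List.pyGetD s mid 0 then bisectLoop s x lo mid
    else bisectLoop s x (mid + 1) hi
  else lo
termination_by (hi - lo).toNat
decreasing_by
  · have hlt : PySem.Int.floordiv (lo + hi) 2 < hi := by
      rw [PySem.Int.floordiv_lt_iff_lt_mul (by omega)]; omega
    omega
  · have hb := PySem.Int.floordiv_two_mid_bounds (le_of_lt h)
    omega
def bisectRight (s : List Int) (x : Int) : Int := bisectLoop s x 0 s.length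
def solution6_alt (left_rings : List Int) : Int :=
  ((PySem.List.enumerate left_rings 0).foldl (fun (st : Int × List Int) p =>
    let pos := bisectRight st.2 p.2
    let answer := if p.2 ≤ p.1 then st.1 + ((st.2.length : Int) - pos) else st.1
    (answer, PySem.List.insert st.2 pos p.2)) ((0 : Int), ([] : List Int))).1

-- ===== PRECONDITION & SPEC =====
def Spec_solution6 (left_rings : List Int) (out : Int) : Prop := out = solution6_alt left_rings
instance (left_rings : List Int) (out : Int) : Decidable (Spec_solution6 left_rings out) := by unfold Spec_solution6; infer_instance

-- ===== CLAIM (what is proved, stated in full; the proofs are below) =====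
def Claim_equal_solution6 : Prop := ∀ (left_rings : List Int), Dom_solution6 left_rings → Spec_solution6 left_rings (solution6 left_rings)

-- ===== LEMMAS AND PROOFS =====

-- the per-index contribution and the common closed form of both folds
def gAux (lr : List Int) (i : Nat) : Int :=
  if lr.getD i 0 ≤ (i : Int) then (((lr.take i).countP (fun a => decide (lr.getD i 0 < a)) : Nat) : Int) else 0
def aSum (lr : List Int) (n : Nat) : Int := ((List.range n).map (gAux lr)).sum

lemma take_succ_getD (lr : List Int) (n : Nat) (h : n < lr.length) :
    lr.take (n + 1) = lr.take n ++ [lr.getD n 0] := by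
  rw [List.take_succ, List.getElem?_eq_getElem h]
  simp [List.getD, List.getElem?_eq_getElem h]

lemma inner_loop_eq (lr : List Int) (v : Int) : ∀ (iN : Nat), iN ≤ lr.length → ∀ (a : Int),
    (PySem.List.pyRange 0 (iN : Int) 1).foldl
      (fun ans k => if v < PySem.List.pyGetD lr k 0 then ans + 1 else ans) a
    = a + (((lr.take iN).countP (fun b => decide (v < b)) : Nat) : Int) := by
  intro iN
  induction iN with
  | zero => intro _ a; simp [PySem.List.pyRange_zero_nat]
  | succ m ih =>
    intro hle a
    have hr : PySem.List.pyRange 0 ((m+1 : Nat) : Int) 1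
        = PySem.List.pyRange 0 (m : Int) 1 ++ [(m : Int)] := by
      push_cast
      exact PySem.List.pyRange_one_succ_right (by positivity)
    rw [hr, List.foldl_append, ih (by omega)]
    have hget : PySem.List.pyGetD lr (m : Int) 0 = lr.getD m 0 := by
      simp [PySem.List.pyGetD_natCast]
    rw [take_succ_getD lr m (by omega)]
    simp only [List.foldl_cons, List.foldl_nil, List.countP_append, hget]
    simp only [List.getD_eq_getElem?_getD] at hget ⊢
    split_ifs with hv <;> simp [List.countP_cons, List.getD_eq_getElem?_getD, hv] <;> push_cast <;> ring

lemma portA_eq (lr : List Int) : solution6 lr = aSum lr lr.length := by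
  unfold solution6
  suffices h : ∀ (n : Nat), n ≤ lr.length → ∀ (a : Int),
      (PySem.List.pyRange 0 (n : Int) 1).foldl (fun answer i =>
        if PySem.List.pyGetD lr i 0 ≤ i then
          (PySem.List.pyRange 0 i 1).foldl (fun answer k =>
            if PySem.List.pyGetD lr i 0 < PySem.List.pyGetD lr k 0 then answer + 1
            else answer) answer
        else answer) a = a + aSum lr n by
    have := h lr.length (le_refl _) 0
    simpa using this
  intro n
  induction n with
  | zero => intro _ a; simp [PySem.List.pyRange_zero_nat, aSum]
  | succ m ih =>
    intro hle a
    have hr : PySem.List.pyRange 0 ((m+1 : Nat) : Int) 1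
        = PySem.List.pyRange 0 (m : Int) 1 ++ [(m : Int)] := by
      push_cast
      exact PySem.List.pyRange_one_succ_right (by positivity)
    rw [hr, List.foldl_append, ih (by omega)]
    have hget : PySem.List.pyGetD lr (m : Int) 0 = lr.getD m 0 := by
      simp [PySem.List.pyGetD_natCast]
    have hsum : aSum lr (m+1) = aSum lr m + gAux lr m := by
      unfold aSum; rw [List.range_succ]; simp
    simp only [List.foldl_cons, List.foldl_nil, hget, hsum]
    by_cases hc : lr.getD m 0 ≤ (m : Int)
    · rw [if_pos hc, inner_loop_eq lr _ m (by omega)]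
      unfold gAux
      rw [if_pos hc]
      ring
    · rw [if_neg hc]
      unfold gAux
      rw [if_neg hc]
      ring

lemma countP_take_drop (x : Int) : ∀ (s : List Int), s.Pairwise (· ≤ ·) →
    (∀ a ∈ s.take (s.countP (fun a => decide (a ≤ x))), a ≤ x) ∧
    (∀ b ∈ s.drop (s.countP (fun a => decide (a ≤ x))), x < b) := by
  intro s
  induction s with
  | nil => simp
  | cons a t ih =>
    intro hp
    rw [List.pairwise_cons] at hp
    obtain ⟨hrel, hpt⟩ := hp
    by_cases hax : a ≤ x
    · have hc : (a :: t).countP (fun a => decide (a ≤ x)) = t.countP (fun a => decide (a ≤ x)) + 1 := by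
        simp [List.countP_cons, hax]
      obtain ⟨h1, h2⟩ := ih hpt
      rw [hc]
      constructor
      · intro b hb
        rw [List.take_succ_cons] at hb
        rcases List.mem_cons.mp hb with rfl | hb
        · omega
        · exact h1 b hb
      · intro b hb
        rw [List.drop_succ_cons] at hb
        exact h2 b hb
    · have hct : t.countP (fun a => decide (a ≤ x)) = 0 := by
        rw [List.countP_eq_zero]
        intro b hb
        have := hrel b hb
        simp; omega
      have hc : (a :: t).countP (fun a => decide (a ≤ x)) = 0 := by
        simp [List.countP_cons, hax, hct]
      rw [hc]
      refine ⟨by simp, ?_⟩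
      intro b hb
      simp at hb
      rcases hb with rfl | hb
      · omega
      · have := hrel b hb; omega

lemma bisect_eq (s : List Int) (x : Int) (hs : s.Pairwise (· ≤ ·)) :
    ∀ (n : Nat) (lo hi : Int), (hi - lo).toNat = n → 0 ≤ lo → hi ≤ s.length →
    lo ≤ (s.countP (fun a => decide (a ≤ x)) : Int) →
    (s.countP (fun a => decide (a ≤ x)) : Int) ≤ hi →
    bisectLoop s x lo hi = (s.countP (fun a => decide (a ≤ x)) : Int) := by
  intro n
  induction n using Nat.strong_induction_on with
  | _ n ih =>
    intro lo hi hn h0 hlen hloc hchi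
    set c := s.countP (fun a => decide (a ≤ x)) with hc
    rw [bisectLoop]
    by_cases h : lo < hi
    · rw [dif_pos h]
      have hmid := PySem.Int.floordiv_two_mid_bounds (le_of_lt h)
      have hmlt : PySem.Int.floordiv (lo + hi) 2 < hi := by
        rw [PySem.Int.floordiv_lt_iff_lt_mul (by omega)]; omega
      set mid := PySem.Int.floordiv (lo + hi) 2 with hmd
      have hmid0 : 0 ≤ mid := by omega
      have hmidlen : mid < (s.length : Int) := by omega
      have hget : PySem.List.pyGetD s mid 0 = s[mid.toNat] :=
        PySem.List.pyGetD_eq_getElem (xs := s) (i := mid) (d := 0) hmid0 (by omega)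
      obtain ⟨htake, hdrop⟩ := countP_take_drop x s hs
      by_cases hcase : x < PySem.List.pyGetD s mid 0
      · rw [if_pos hcase]
        -- c ≤ mid
        have hcm : (c : Int) ≤ mid := by
          by_contra hcon
          have hmc : mid.toNat < c := by omega
          have hel : s[mid.toNat] ∈ s.take c := by
            have hl : mid.toNat < (s.take c).length := by rw [List.length_take]; omega
            have hq : (s.take c)[mid.toNat] = s[mid.toNat] := List.getElem_take ..
            rw [← hq]; exact List.getElem_mem _
          have := htake _ hel
          rw [hget] at hcase; omega
        exact ih (mid - lo).toNat (by omega) lo mid rfl h0 (by omega) hloc hcm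
      · rw [if_neg hcase]
        -- mid < c
        have hcm : mid < (c : Int) := by
          by_contra hcon
          have hmc : c ≤ mid.toNat := by omega
          have hel : s[mid.toNat] ∈ s.drop c := by
            have hl2 : mid.toNat - c < (s.drop c).length := by rw [List.length_drop]; omega
            have hg : (s.drop c)[mid.toNat - c] = s[mid.toNat] := by
              rw [List.getElem_drop]
              congr 1; omega
            rw [← hg]
            apply List.getElem_mem
          have := hdrop _ hel
          rw [hget] at hcase; omega
        exact ih (hi - (mid+1)).toNat (by omega) (mid+1) hi rfl (by omega) hlen (by omega) hchi
    · rw [dif_neg h]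
      omega

lemma bisectRight_eq (s : List Int) (x : Int) (hs : s.Pairwise (· ≤ ·)) :
    bisectRight s x = (s.countP (fun a => decide (a ≤ x)) : Int) := by
  refine bisect_eq s x hs ((s.length : Int) - 0).toNat 0 s.length rfl (by omega) le_rfl
    (by positivity) ?_
  exact_mod_cast Nat.cast_le.mpr List.countP_le_length

lemma length_sub_count (s : List Int) (v : Int) :
    (s.length : Int) - (s.countP (fun a => decide (a ≤ v)) : Nat) =
    ((s.countP (fun a => decide (v < a)) : Nat) : Int) := by
  have h1 : s.countP (fun a => decide (a ≤ v)) + s.countP (fun a => !decide (a ≤ v)) = s.length := by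
    induction s with
    | nil => simp
    | cons a t ih => by_cases h : a ≤ v <;> simp [h] <;> try omega
  have h2 : s.countP (fun a => !decide (a ≤ v)) = s.countP (fun a => decide (v < a)) := by
    apply List.countP_congr
    intro a _
    simp
  omega

lemma B_inv (lr : List Int) : ∀ (n : Nat), n ≤ lr.length →
    ∃ s : List Int,
      ((PySem.List.enumerate (lr.take n) 0).foldl (fun (st : Int × List Int) p =>
        let pos := bisectRight st.2 p.2
        let answer := if p.2 ≤ p.1 then st.1 + ((st.2.length : Int) - pos) else st.1
        (answer, PySem.List.insert st.2 pos p.2)) ((0 : Int), ([] : List Int)))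
        = (aSum lr n, s)
      ∧ s.Pairwise (· ≤ ·) ∧ s.Perm (lr.take n) := by
  intro n
  induction n with
  | zero => exact fun _ => ⟨[], by simp [PySem.List.enumerate, aSum], List.Pairwise.nil, by simp⟩
  | succ m ih =>
    intro hle
    obtain ⟨s, hfold, hsort, hperm⟩ := ih (by omega)
    set v := lr.getD m 0 with hv
    set c := s.countP (fun a => decide (a ≤ v)) with hc
    have hcle : c ≤ s.length := List.countP_le_length
    have htk : lr.take (m+1) = lr.take m ++ [v] := take_succ_getD lr m (by omega)
    have hlen : (lr.take m).length = m := by rw [List.length_take]; omega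
    have henum : PySem.List.enumerate (lr.take (m+1)) 0
        = PySem.List.enumerate (lr.take m) 0 ++ [((m : Int), v)] := by
      rw [htk, PySem.List.enumerate_append, hlen]
      simp [PySem.List.enumerate_cons, PySem.List.enumerate_nil]
    rw [henum, List.foldl_append, hfold]
    have hbr : bisectRight s v = (c : Int) := bisectRight_eq s v hsort
    have hcnt : (s.length : Int) - (c : Int) =
        (((lr.take m).countP (fun a => decide (v < a)) : Nat) : Int) := by
      rw [hc, length_sub_count s v, hperm.countP_eq]
    have hins : PySem.List.insert s (c : Int) v = s.take c ++ v :: s.drop c :=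
      PySem.List.insert_natCast s c v hcle
    obtain ⟨htkf, hdpf⟩ := countP_take_drop v s hsort
    refine ⟨s.take c ++ v :: s.drop c, ?_, ?_, ?_⟩
    · simp only [List.foldl_cons, List.foldl_nil, hbr, hins]
      congr 1
      · -- answer component
        have hsum : aSum lr (m+1) = aSum lr m + gAux lr m := by
          unfold aSum; rw [List.range_succ]; simp
        rw [hsum]
        unfold gAux
        by_cases hcond : v ≤ (m : Int)
        · rw [if_pos (by exact_mod_cast hcond), if_pos hcond, hcnt]
        · rw [if_neg (by exact_mod_cast hcond), if_neg hcond, add_zero]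
    · -- sortedness
      rw [List.pairwise_append]
      refine ⟨hsort.sublist (List.take_sublist _ _), ?_, ?_⟩
      · rw [List.pairwise_cons]
        exact ⟨fun b hb => le_of_lt (hdpf b hb), hsort.sublist (List.drop_sublist _ _)⟩
      · intro a ha b hb
        have hav := htkf a ha
        rcases List.mem_cons.mp hb with rfl | hb
        · exact hav
        · exact le_trans hav (le_of_lt (hdpf b hb))
    · -- permutation
      have p1 : (s.take c ++ v :: s.drop c).Perm (v :: s) := by
        have h := List.perm_middle (a := v) (l₁ := s.take c) (l₂ := s.drop c)
        rwa [List.take_append_drop] at h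
      rw [htk]
      exact p1.trans ((hperm.cons v).trans (List.perm_append_singleton v _).symm)

lemma portB_eq (lr : List Int) : solution6_alt lr = aSum lr lr.length := by
  obtain ⟨s, hfold, -, -⟩ := B_inv lr lr.length (le_refl _)
  rw [List.take_length] at hfold
  unfold solution6_alt
  rw [hfold]

-- ===== VERDICT (by name: the statement is the Claim_ definition above) =====
theorem solution6_spec : Claim_equal_solution6 := by
  intro lr _
  unfold Spec_solution6
  rw [portA_eq, portB_eq]
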